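-- pv_equiv track=rewrite | github.com/ecolban/Codewars | python_code/src/unfinished_game.py | divide_pot1
-- ===== SOURCE A (Python) =====
-- from functools import reduce, cache
-- from math import factorial, gcd, prod
--
-- def divide_pot1(num_rounds, wins):
--     score = tuple(num_rounds - w for w in wins)
--     num_players = len(score)
--
--     @cache
--     def h(score_: tuple[int, ...]) -> int:
--         """Returns the part of the pot that player with score_[0] should receive."""
--         denominator = num_players ** (sum(score_) - num_players)
--         return sum(
--             (denominator if i == 0 else 0) if s == 1
--             else h(tuple(s_ - 1 if i == j else s_ for j, s_ in enumerate(score_)))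
--             for i, s in enumerate(score_)
--         )
--
--     def swap(k):
--         return tuple(score[k] if i == 0 else score[0] if i == k else s
--                      for i, s in enumerate(score))
--
--     preliminary_result = [h(swap(k)) for k in range(len(score))]
--     d = gcd(*preliminary_result)
--     return [x // d for x in preliminary_result]
-- ===== SOURCE B (Python) =====
-- from functools import reduce, cache
-- from math import gcd
--
-- def divide_pot1(num_rounds, wins):
--     score = tuple(num_rounds - w for w in wins)
--     n = len(score)
--
--     @cache
--     def shares(s):
--         """Vector of pot shares for ALL players at remaining-scores s (one
--         recursion for the whole table instead of one per player)."""
--         d = n ** (sum(s) - n)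
--         total = [0] * n
--         for j, v in enumerate(s):
--             if v == 1:
--                 total[j] += d
--             else:
--                 sub = shares(s[:j] + (v - 1,) + s[j + 1:])
--                 total = [a + b for a, b in zip(total, sub)]
--         return tuple(total)
--
--     preliminary = list(shares(score))
--     d = reduce(gcd, preliminary, 0)
--     return [x // d for x in preliminary]
-- ===== Notes on version B (the rewrite author's own statement) =====
-- stated objective: alternative
-- what changed: A runs a scalar memoized recursion h once per player on a 0<->k swapped score tuple and collects the n results; B runs a single vector-valued recursion that computes all n players' shares at once (no swap, no per-player restart), then reduces by the gcd exactly as A does.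
import Mathlib
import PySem

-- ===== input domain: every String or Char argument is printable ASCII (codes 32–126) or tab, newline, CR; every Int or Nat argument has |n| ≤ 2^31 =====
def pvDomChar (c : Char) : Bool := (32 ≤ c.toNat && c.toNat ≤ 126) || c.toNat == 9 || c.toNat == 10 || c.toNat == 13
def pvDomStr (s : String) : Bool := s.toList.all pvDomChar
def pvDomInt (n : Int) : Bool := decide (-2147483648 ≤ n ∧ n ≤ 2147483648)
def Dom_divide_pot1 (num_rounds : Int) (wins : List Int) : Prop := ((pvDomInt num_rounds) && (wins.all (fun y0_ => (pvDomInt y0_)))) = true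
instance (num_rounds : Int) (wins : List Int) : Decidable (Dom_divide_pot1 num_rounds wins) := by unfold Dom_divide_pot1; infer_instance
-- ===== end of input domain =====

-- B replaces A's per-player swap-and-recurse scheme (one memoized scalar recursion
-- started n times on permuted score tuples) by a single vector-valued recursion that
-- computes all players' shares at once; objective: alternative decomposition.

-- ===== PORT A =====
-- tuple(s_ - 1 if i == j else s_ for j, s_ in enumerate(score_))
def pvDecA (s : List Int) (i : Int) : List Int :=
  (PySem.List.enumerate s 0).map (fun q => if i == q.1 then q.2 - 1 else q.2)

-- swap(k): tuple(score[k] if i == 0 else score[0] if i == k else s for i, s in enumerate(score))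
def pvSwapA (score : List Int) (k : Int) : List Int :=
  (PySem.List.enumerate score 0).map (fun p =>
    if p.1 == 0 then PySem.List.pyGetD score k 0
    else if p.1 == k then PySem.List.pyGetD score 0 0
    else p.2)

-- @cache h(score_); general recursion ported with a fuel parameter (the caller passes
-- enough fuel for every call made from an input satisfying Pre_) and the functools
-- cache ported as an explicit dictionary threaded through the evaluation order
-- (terms of the sum left to right, then the result is stored under score_).
-- The exponent sum(score_) - num_players is nonnegative on every state reached under Pre_.
def pvHAM (n : Int) : Nat → List Int → Std.HashMap (List Int) Int →
    (Int × Std.HashMap (List Int) Int)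
  | 0, _, c => (0, c)
  | (fuel+1), s, c =>
    match c.get? s with
    | some v => (v, c)
    | none =>
      let denominator : Int := n ^ (s.sum - n).toNat
      let r := (PySem.List.enumerate s 0).foldl
        (fun (acc : Int × Std.HashMap (List Int) Int) p =>
          if p.2 == 1 then (acc.1 + (if p.1 == 0 then denominator else 0), acc.2)
          else
            let rc := pvHAM n fuel (pvDecA s p.1) acc.2
            (acc.1 + rc.1, rc.2))
        (0, c)
      (r.1, r.2.insert s r.1)

def divide_pot1 (num_rounds : Int) (wins : List Int) : List Int :=
  let score := wins.map (fun w => num_rounds - w)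
  let numPlayers : Int := score.length
  let fuel := (score.sum - numPlayers).toNat + 1
  -- [h(swap(k)) for k in range(len(score))], h's cache persisting across the comprehension
  let pr := (PySem.List.pyRange 0 score.length 1).foldl
    (fun (acc : List Int × Std.HashMap (List Int) Int) k =>
      let r := pvHAM numPlayers fuel (pvSwapA score k) acc.2
      (acc.1 ++ [r.1], r.2))
    ([], ∅)
  let preliminary := pr.1
  let d : Int := preliminary.foldl (fun a x => ((a.gcd x : Nat) : Int)) 0   -- gcd(*preliminary)
  preliminary.map (fun x => PySem.Int.floordiv x d)

-- ===== PORT B =====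
-- @cache shares(s): vector of all players' shares; same fuel discipline as pvHAM and
-- the same explicit-dictionary port of the functools cache.
def pvSharesM (n : Int) : Nat → List Int → Std.HashMap (List Int) (List Int) →
    (List Int × Std.HashMap (List Int) (List Int))
  | 0, s, c => (List.replicate s.length 0, c)
  | (fuel+1), s, c =>
    match c.get? s with
    | some v => (v, c)
    | none =>
      let d : Int := n ^ (s.sum - n).toNat
      let r := (PySem.List.enumerate s 0).foldl
        (fun (acc : List Int × Std.HashMap (List Int) (List Int)) p =>
          if p.2 == 1 then
            -- total[j] += d
            ((PySem.List.enumerate acc.1 0).map (fun q => if q.1 == p.1 then q.2 + d else q.2),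
             acc.2)
          else
            -- [a + b for a, b in zip(total, shares(s[:j] + (v-1,) + s[j+1:]))]
            let rc := pvSharesM n fuel
              (PySem.List.slice s none (some p.1) ++ [p.2 - 1] ++
               PySem.List.slice s (some (p.1 + 1)) none) acc.2
            ((acc.1.zip rc.1).map (fun ab => ab.1 + ab.2), rc.2))
        (List.replicate s.length 0, c)
      (r.1, r.2.insert s r.1)

def divide_pot1_alt (num_rounds : Int) (wins : List Int) : List Int :=
  let score := wins.map (fun w => num_rounds - w)
  let n : Int := score.length
  let fuel := (score.sum - n).toNat + 1
  let preliminary := (pvSharesM n fuel score ∅).1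
  let d : Int := preliminary.foldl (fun a x => ((a.gcd x : Nat) : Int)) 0   -- reduce(gcd, preliminary, 0)
  preliminary.map (fun x => PySem.Int.floordiv x d)

-- ===== PRECONDITION & SPEC =====
-- A's inner recursion h decrements a player's remaining score until it reaches 1, so any
-- player with num_rounds - w ≤ 0 (a player who already has all the rounds, or more) makes
-- the Python recurse without bound (RecursionError); Pre_ excludes exactly those inputs.
def Pre_divide_pot1 (num_rounds : Int) (wins : List Int) : Prop :=
  ∀ w ∈ wins, w < num_rounds

instance (num_rounds : Int) (wins : List Int) : Decidable (Pre_divide_pot1 num_rounds wins) := by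
  unfold Pre_divide_pot1; infer_instance

def pvWitness_divide_pot1 : Int × List Int := (5, [2, 3, 0])

def Spec_divide_pot1 (num_rounds : Int) (wins : List Int) (out : List Int) : Prop := out = divide_pot1_alt num_rounds wins
instance (num_rounds : Int) (wins : List Int) (out : List Int) : Decidable (Spec_divide_pot1 num_rounds wins out) := by unfold Spec_divide_pot1; infer_instance

-- ===== CLAIM (what is proved, stated in full; the proofs are below) =====
def Claim_equal_divide_pot1 : Prop := ∀ (num_rounds : Int) (wins : List Int), Dom_divide_pot1 num_rounds wins → Pre_divide_pot1 num_rounds wins → Spec_divide_pot1 num_rounds wins (divide_pot1 num_rounds wins)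

-- ===== LEMMAS AND PROOFS =====

-- Ghost (proof-only) cache-free versions of the two recursions.
def pvHA (n : Int) : Nat → List Int → Int
  | 0, _ => 0
  | (fuel+1), s =>
    let denominator : Int := n ^ (s.sum - n).toNat
    ((PySem.List.enumerate s 0).map (fun p =>
        if p.2 == 1 then (if p.1 == 0 then denominator else 0)
        else pvHA n fuel (pvDecA s p.1))).sum

def pvShares (n : Int) : Nat → List Int → List Int
  | 0, s => List.replicate s.length 0
  | (fuel+1), s =>
    let d : Int := n ^ (s.sum - n).toNat
    (PySem.List.enumerate s 0).foldl
      (fun total p =>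
        if p.2 == 1 then
          (PySem.List.enumerate total 0).map (fun q => if q.1 == p.1 then q.2 + d else q.2)
        else
          ((total.zip (pvShares n fuel
              (PySem.List.slice s none (some p.1) ++ [p.2 - 1] ++
               PySem.List.slice s (some (p.1 + 1)) none))).map (fun ab => ab.1 + ab.2)))
      (List.replicate s.length 0)

-- getElem! of an in-range index is getElem
theorem pvGetBang (l : List Int) (i : Nat) (h : i < l.length) : l[i]! = l[i] := by
  simp [List.getElem!_eq_getElem?_getD, List.getElem?_eq_getElem h]

theorem pvEnumMap_length {α : Type} (s : List Int) (f : Int × Int → α) :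
    ((PySem.List.enumerate s 0).map f).length = s.length := by
  simp [PySem.List.length_enumerate]

theorem pvEnumMapBang (s : List Int) (f : Int × Int → Int) (i : Nat) (hi : i < s.length) :
    ((PySem.List.enumerate s 0).map f)[i]! = f ((i : Int), s[i]!) := by
  rw [pvGetBang _ i (by simpa [pvEnumMap_length] using hi), List.getElem_map,
    PySem.List.getElem_enumerate, pvGetBang s i hi]
  simp

theorem pvSumEnumMap' (f : Int × Int → Int) :
    ∀ (s : List Int) (a : Int),
      ((PySem.List.enumerate s a).map f).sum = ∑ i ∈ Finset.range s.length, f (a + (i : Int), s[i]!)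
  | [], a => by simp [PySem.List.enumerate_nil]
  | x :: xs, a => by
    rw [PySem.List.enumerate_cons]
    simp only [List.map_cons, List.sum_cons, pvSumEnumMap' f xs (a + 1)]
    rw [List.length_cons, Finset.sum_range_succ']
    have h0 : ((x :: xs)[0]! : Int) = x := by simp
    rw [h0]
    have hterm : ∀ i ∈ Finset.range xs.length,
        f (a + 1 + (i : Int), xs[i]!) = f (a + ((i : Nat) + 1 : Nat), (x :: xs)[i + 1]!) := by
      intro i _
      have hx : ((x :: xs)[i + 1]! : Int) = xs[i]! := by simp
      rw [hx]; congr 2; push_cast; ring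
    rw [Finset.sum_congr rfl hterm]
    simp [add_comm]

theorem pvSumEnumMap0 (s : List Int) (f : Int × Int → Int) :
    ((PySem.List.enumerate s 0).map f).sum = ∑ i ∈ Finset.range s.length, f ((i : Int), s[i]!) := by
  rw [pvSumEnumMap' f s 0]
  exact Finset.sum_congr rfl (fun i _ => by rw [zero_add])

theorem pvSumIdx (s : List Int) : s.sum = ∑ i ∈ Finset.range s.length, s[i]! := by
  conv_lhs => rw [← PySem.List.map_snd_enumerate s 0]
  exact pvSumEnumMap0 s (fun p => p.2)

-- the transposition of indices 0 and k (A's swap on positions)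
def pvT (k i : Nat) : Nat := if i = 0 then k else if i = k then 0 else i

theorem pvT_invol (k : Nat) : Function.Involutive (pvT k) := by
  intro i; unfold pvT; split_ifs <;> omega

theorem pvT_lt {m k i : Nat} (hk : k < m) (hi : i < m) : pvT k i < m := by
  unfold pvT; split_ifs <;> omega

theorem pvT_zero_iff (k i : Nat) : pvT k i = 0 ↔ i = k := by
  unfold pvT; split_ifs <;> omega

theorem pvSumReindex (m k : Nat) (hk : k < m) (F : Nat → Int) :
    ∑ i ∈ Finset.range m, F i = ∑ j ∈ Finset.range m, F (pvT k j) := by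
  refine Finset.sum_bijective (pvT k) ((pvT_invol k).bijective) (fun i => ?_) (fun i _ => (congrArg F (pvT_invol k i)).symm)
  simp only [Finset.mem_range]
  constructor
  · exact fun h => pvT_lt hk h
  · intro h
    have h2 := pvT_lt hk h
    rwa [pvT_invol k i] at h2

-- characterisations of the port-side list builders
theorem pvSwap_length (s : List Int) (k : Int) : (pvSwapA s k).length = s.length :=
  pvEnumMap_length s _

theorem pvSwap_getElemBang (s : List Int) (k i : Nat) (hk : k < s.length) (hi : i < s.length) :
    (pvSwapA s (k : Int))[i]! = s[pvT k i]! := by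
  unfold pvSwapA
  rw [pvEnumMapBang s _ i hi]
  have h0k : (0 : Nat) < s.length := Nat.lt_of_le_of_lt (Nat.zero_le k) hk
  have hkn : PySem.List.pyGetD s (k : Int) 0 = s[(k : Nat)]! := by
    rw [PySem.List.pyGetD_eq_getElem s 0 (by positivity) (by exact_mod_cast hk)]
    simp [pvGetBang s k hk]
  have h0n : PySem.List.pyGetD s (0 : Int) 0 = s[(0 : Nat)]! := by
    rw [PySem.List.pyGetD_eq_getElem s 0 (by norm_num) (by exact_mod_cast h0k)]
    simp [pvGetBang s 0 h0k]
  by_cases h1 : i = 0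
  · subst h1; simp [pvT, hkn]
  · by_cases h2 : i = k
    · subst h2
      have e1 : ((i : Int) == (0 : Int)) = false := by simpa using h1
      simp [pvT, e1, h1, h0n]
    · have e1 : ((i : Int) == (0 : Int)) = false := by simpa using h1
      have e2 : ((i : Int) == (k : Int)) = false := by simpa using h2
      simp [pvT, e1, e2, h1, h2]

theorem pvDec_length (s : List Int) (j : Int) : (pvDecA s j).length = s.length :=
  pvEnumMap_length s _

theorem pvDec_getElemBang (s : List Int) (j i : Nat) (hi : i < s.length) :
    (pvDecA s (j : Int))[i]! = if j = i then s[i]! - 1 else s[i]! := by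
  unfold pvDecA
  rw [pvEnumMapBang s _ i hi]
  by_cases h : j = i
  · subst h; simp
  · have e : ((j : Int) == (i : Int)) = false := by simpa using h
    simp [e, h]

theorem pvDec_eq_set (s : List Int) (j : Nat) (hj : j < s.length) :
    pvDecA s (j : Int) = s.set j (s[j]! - 1) := by
  apply List.ext_getElem
  · simp [pvDec_length]
  · intro i h1 h2
    have hi : i < s.length := by simpa [pvDec_length] using h1
    rw [← pvGetBang _ i h1, ← pvGetBang _ i h2, pvDec_getElemBang s j i hi]
    by_cases h : j = i
    · subst h
      rw [pvGetBang _ j h2, List.getElem_set_self, pvGetBang s j hj]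
      simp
    · rw [pvGetBang _ i h2, List.getElem_set_ne (h := fun hh => h hh)]
      rw [pvGetBang s i hi]
      simp [h]

theorem pvSwap_sum (s : List Int) (k : Nat) (hk : k < s.length) :
    (pvSwapA s (k : Int)).sum = s.sum := by
  rw [pvSumIdx, pvSumIdx, pvSwap_length]
  rw [Finset.sum_congr rfl (fun i hi => pvSwap_getElemBang s k i hk (Finset.mem_range.mp hi))]
  exact (pvSumReindex s.length k hk (fun i => s[i]!)).symm

theorem pvSwapDec_comm (s : List Int) (k j : Nat) (hk : k < s.length) (hj : j < s.length) :
    pvDecA (pvSwapA s (k : Int)) ((pvT k j : Nat) : Int) = pvSwapA (pvDecA s (j : Int)) (k : Int) := by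
  apply List.ext_getElem
  · simp [pvDec_length, pvSwap_length]
  · intro i h1 h2
    have hi : i < s.length := by simpa [pvDec_length, pvSwap_length] using h1
    rw [← pvGetBang _ i h1, ← pvGetBang _ i h2,
      pvDec_getElemBang (pvSwapA s (k : Int)) (pvT k j) i (by simpa [pvSwap_length] using hi),
      pvSwap_getElemBang s k i hk hi,
      pvSwap_getElemBang (pvDecA s (j : Int)) k i (by simpa [pvDec_length] using hk)
        (by simpa [pvDec_length] using hi),
      pvDec_getElemBang s j (pvT k i) (pvT_lt hk hi)]
    have hiff : pvT k j = i ↔ j = pvT k i := by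
      constructor
      · intro h; subst h; exact (pvT_invol k j).symm
      · intro h; subst h; exact pvT_invol k i
    by_cases hc : pvT k j = i
    · rw [if_pos hc, if_pos (hiff.mp hc)]
    · rw [if_neg hc, if_neg (fun hh => hc (hiff.mpr hh))]

-- the step function of B's fold, named for the proofs
def pvStep (n : Int) (fuel : Nat) (s : List Int) (d : Int) : List Int → Int × Int → List Int :=
  fun total p =>
    if p.2 == 1 then
      (PySem.List.enumerate total 0).map (fun q => if q.1 == p.1 then q.2 + d else q.2)
    else
      ((total.zip (pvShares n fuel
          (PySem.List.slice s none (some p.1) ++ [p.2 - 1] ++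
           PySem.List.slice s (some (p.1 + 1)) none))).map (fun ab => ab.1 + ab.2))

theorem pvShares_succ (n : Int) (fuel : Nat) (s : List Int) :
    pvShares n (fuel + 1) s =
      (PySem.List.enumerate s 0).foldl (pvStep n fuel s (n ^ (s.sum - n).toNat))
        (List.replicate s.length 0) := rfl

-- the list B decrements with slices is A's decremented list
theorem pvDecS_eq (s : List Int) (j : Nat) (hj : j < s.length) :
    PySem.List.slice s none (some ((j : Nat) : Int)) ++ [s[j]! - 1] ++
      PySem.List.slice s (some (((j : Nat) : Int) + 1)) none = pvDecA s (j : Int) := by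
  rw [pvDec_eq_set s j hj]
  have hc : ((j : Nat) : Int) + 1 = (((j + 1 : Nat)) : Int) := by push_cast; ring
  rw [hc, PySem.List.slice_to_natCast, PySem.List.slice_from_natCast]
  rw [List.set_eq_take_append_cons_drop]
  simp [hj]

theorem pvZipAdd_getElemBang (a b : List Int) (k : Nat) (hk : k < a.length)
    (hlen : b.length = a.length) :
    ((a.zip b).map (fun ab => ab.1 + ab.2))[k]! = a[k]! + b[k]! := by
  have hkz : k < (a.zip b).length := by simp [List.length_zip, hlen]; omega
  rw [pvGetBang _ k (by simpa using hkz), List.getElem_map, List.getElem_zip,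
    pvGetBang a k hk, pvGetBang b k (by omega)]

theorem pvShares_length (n : Int) : ∀ (fuel : Nat) (s : List Int),
    (pvShares n fuel s).length = s.length := by
  intro fuel
  induction fuel with
  | zero => intro s; simp [pvShares]
  | succ fuel ih =>
    intro s
    rw [pvShares_succ]
    have hfold : ∀ (L : List (Int × Int)), (∀ p ∈ L, p ∈ PySem.List.enumerate s 0) →
        ∀ total : List Int, total.length = s.length →
        (L.foldl (pvStep n fuel s (n ^ (s.sum - n).toNat)) total).length = s.length := by
      intro L
      induction L with
      | nil => intro _ total ht; simpa using ht
      | cons p L' ihL =>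
        intro hmem total ht
        rw [List.foldl_cons]
        refine ihL (fun q hq => hmem q (List.mem_cons_of_mem p hq)) _ ?_
        have hp := hmem p (List.mem_cons_self ..)
        rcases (PySem.List.mem_enumerate_iff s 0 p).mp hp with ⟨jj, hjj, hpe⟩
        unfold pvStep
        by_cases hb : (p.2 == 1) = true
        · rw [if_pos hb, pvEnumMap_length total _, ht]
        · rw [if_neg hb]
          rw [List.length_map, List.length_zip, ht]
          have : (pvShares n fuel
              (PySem.List.slice s none (some p.1) ++ [p.2 - 1] ++
               PySem.List.slice s (some (p.1 + 1)) none)).length = s.length := by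
            have hp1 : p.1 = ((jj : Nat) : Int) := by rw [hpe]; simp
            have hp2 : p.2 = s[jj]! := by rw [hpe]; simp [pvGetBang s jj hjj]
            rw [hp1, hp2, pvDecS_eq s jj hjj, ih, pvDec_length]
          rw [this]
          omega
    exact hfold _ (fun p hp => hp) _ (by simp)

theorem pvFold_getElemBang (n : Int) (fuel : Nat) (s : List Int) (d : Int) (k : Nat)
    (hk : k < s.length) :
    ∀ (L : List (Int × Int)), (∀ p ∈ L, p ∈ PySem.List.enumerate s 0) →
    ∀ total : List Int, total.length = s.length →
    (L.foldl (pvStep n fuel s d) total)[k]! =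
      total[k]! + (L.map (fun p =>
        if p.2 == 1 then (if (k : Int) == p.1 then d else 0)
        else (pvShares n fuel
          (PySem.List.slice s none (some p.1) ++ [p.2 - 1] ++
           PySem.List.slice s (some (p.1 + 1)) none))[k]!)).sum := by
  intro L
  induction L with
  | nil => intro _ total _; simp
  | cons p L' ihL =>
    intro hmem total ht
    have hp := hmem p (List.mem_cons_self ..)
    rcases (PySem.List.mem_enumerate_iff s 0 p).mp hp with ⟨jj, hjj, hpe⟩
    have hp1 : p.1 = ((jj : Nat) : Int) := by rw [hpe]; simp
    have hp2 : p.2 = s[jj]! := by rw [hpe]; simp [pvGetBang s jj hjj]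
    have hslen : (pvShares n fuel
        (PySem.List.slice s none (some p.1) ++ [p.2 - 1] ++
         PySem.List.slice s (some (p.1 + 1)) none)).length = s.length := by
      rw [hp1, hp2, pvDecS_eq s jj hjj, pvShares_length, pvDec_length]
    have hstep_len : (pvStep n fuel s d total p).length = s.length := by
      unfold pvStep
      by_cases hb : (p.2 == 1) = true
      · rw [if_pos hb, pvEnumMap_length total _, ht]
      · rw [if_neg hb]
        rw [List.length_map, List.length_zip, ht, hslen]; omega
    have hstep_get : (pvStep n fuel s d total p)[k]! = total[k]! +
        (if p.2 == 1 then (if (k : Int) == p.1 then d else 0)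
         else (pvShares n fuel
           (PySem.List.slice s none (some p.1) ++ [p.2 - 1] ++
            PySem.List.slice s (some (p.1 + 1)) none))[k]!) := by
      unfold pvStep
      by_cases hb : (p.2 == 1) = true
      · rw [if_pos hb, if_pos hb]
        rw [pvEnumMapBang total _ k (by omega)]
        by_cases hc : ((k : Int) == p.1) = true
        · simp [hc]
        · simp only [hc]
          simp
      · rw [if_neg hb, if_neg hb]
        exact pvZipAdd_getElemBang total _ k (by omega) (by rw [hslen, ht])
    rw [List.foldl_cons, List.map_cons, List.sum_cons,
      ihL (fun q hq => hmem q (List.mem_cons_of_mem p hq)) _ hstep_len, hstep_get]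
    ring

-- MAIN LEMMA: B's vector at position k is A's h on the 0↔k-swapped score
theorem pvMain : ∀ (fuel : Nat) (s : List Int) (k : Nat), k < s.length →
    pvHA (s.length : Int) fuel (pvSwapA s (k : Int)) =
      (pvShares (s.length : Int) fuel s)[k]! := by
  intro fuel
  induction fuel with
  | zero =>
    intro s k hk
    simp [pvHA, pvShares, pvGetBang (List.replicate s.length (0 : Int)) k (by simpa using hk)]
  | succ fuel ih =>
    intro s k hk
    have hswlen : (pvSwapA s (k : Int)).length = s.length := pvSwap_length s _
    have hswsum : (pvSwapA s (k : Int)).sum = s.sum := pvSwap_sum s k hk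
    -- left side
    show ((PySem.List.enumerate (pvSwapA s (k : Int)) 0).map (fun p =>
        if p.2 == 1 then
          (if p.1 == 0 then (s.length : Int) ^ (((pvSwapA s (k : Int)).sum - (s.length : Int)).toNat) else 0)
        else pvHA (s.length : Int) fuel (pvDecA (pvSwapA s (k : Int)) p.1))).sum = _
    rw [pvSumEnumMap0, hswlen, hswsum]
    rw [pvSumReindex s.length k hk]
    -- right side
    rw [pvShares_succ,
      pvFold_getElemBang (s.length : Int) fuel s _ k hk _ (fun p hp => hp) _ (by simp),
      pvGetBang (List.replicate s.length (0 : Int)) k (by simpa using hk)]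
    simp only [List.getElem_replicate, zero_add]
    rw [pvSumEnumMap0]
    refine Finset.sum_congr rfl ?_
    intro j hj
    have hjm : j < s.length := Finset.mem_range.mp hj
    have htj : pvT k j < s.length := pvT_lt hk hjm
    rw [pvSwap_getElemBang s k (pvT k j) hk htj, pvT_invol k j]
    by_cases hb : (s[j]! == 1) = true
    · rw [if_pos hb, if_pos hb]
      have hzero : (((pvT k j : Nat) : Int) == (0 : Int)) = ((k : Int) == (j : Int)) := by
        by_cases hc : j = k
        · subst hc; simp [pvT_zero_iff]
        · have e1 : (((pvT k j : Nat) : Int) == (0 : Int)) = false := by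
            simp [pvT_zero_iff]; omega
          have e2 : ((k : Int) == (j : Int)) = false := by
            simp; omega
          rw [e1, e2]
      rw [hzero]
    · rw [if_neg hb, if_neg hb]
      rw [pvSwapDec_comm s k j hk hjm]
      have hdlen : (pvDecA s (j : Int)).length = s.length := pvDec_length s _
      have ih2 := ih (pvDecA s (j : Int)) k (by rw [hdlen]; exact hk)
      rw [hdlen] at ih2
      rw [ih2]
      have hp1 : ((0 : Int) + (j : Int)) = ((j : Nat) : Int) := by simp
      rw [show (PySem.List.slice s none (some ((j : Nat) : Int)) ++ [s[j]! - 1] ++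
           PySem.List.slice s (some (((j : Nat) : Int) + 1)) none) = pvDecA s (j : Int) from
           pvDecS_eq s j hjm]


-- ===== memoisation layer: the cached ports compute the ghost recursions =====

def pvValid (n : Int) (t : List Int) : Prop := ((t.length : Int) = n) ∧ (∀ x ∈ t, 1 ≤ x)

def pvBound (n : Int) (t : List Int) : Nat := (t.sum - n).toNat + 1

def pvV (n : Int) (t : List Int) : Int := pvHA n (pvBound n t) t

def pvVB (n : Int) (t : List Int) : List Int := pvShares n (pvBound n t) t

theorem pvSumLB : ∀ (t : List Int), (∀ x ∈ t, 1 ≤ x) → (t.length : Int) ≤ t.sum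
  | [], _ => by simp
  | x :: xs, h => by
    have h1 := h x (List.mem_cons_self ..)
    have h2 := pvSumLB xs (fun y hy => h y (List.mem_cons_of_mem x hy))
    simp only [List.sum_cons, List.length_cons]
    push_cast
    omega

theorem pvDec_sum (t : List Int) (i : Nat) (hi : i < t.length) :
    (pvDecA t (i : Int)).sum = t.sum - 1 := by
  rw [pvSumIdx, pvSumIdx, pvDec_length]
  rw [Finset.sum_congr rfl (fun j hj => pvDec_getElemBang t i j (Finset.mem_range.mp hj))]
  have hsplit : ∀ j ∈ Finset.range t.length,
      (if i = j then t[j]! - 1 else t[j]!) = t[j]! - (if i = j then 1 else 0) := by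
    intro j _; split_ifs <;> ring
  rw [Finset.sum_congr rfl hsplit, Finset.sum_sub_distrib, Finset.sum_ite_eq _ i _]
  simp [hi]

theorem pvMemGet (t : List Int) (x : Int) (hx : x ∈ t) : ∃ j, ∃ _ : j < t.length, t[j]! = x := by
  rcases List.mem_iff_getElem.mp hx with ⟨j, hj, he⟩
  exact ⟨j, hj, by rw [pvGetBang t j hj, he]⟩

theorem pvDec_valid (n : Int) (t : List Int) (i : Nat) (hv : pvValid n t)
    (_hi : i < t.length) (h2 : t[i]! ≠ 1) : pvValid n (pvDecA t (i : Int)) := by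
  refine ⟨by rw [pvDec_length]; exact hv.1, ?_⟩
  intro x hx
  rcases pvMemGet _ x hx with ⟨j, hj, he⟩
  have hjt : j < t.length := by simpa [pvDec_length] using hj
  rw [pvDec_getElemBang t i j hjt] at he
  have hge : (1 : Int) ≤ t[j]! := by
    rw [pvGetBang t j hjt]; exact hv.2 _ (List.getElem_mem hjt)
  by_cases hij : i = j
  · subst hij
    rw [if_pos rfl] at he
    omega
  · rw [if_neg hij] at he
    omega

theorem pvBound_dec (n : Int) (t : List Int) (i : Nat) (hv : pvValid n t)
    (hi : i < t.length) (h2 : t[i]! ≠ 1) :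
    pvBound n t = pvBound n (pvDecA t (i : Int)) + 1 := by
  have hs := pvDec_sum t i hi
  have hlb := pvSumLB (pvDecA t (i : Int)) (pvDec_valid n t i hv hi h2).2
  rw [pvDec_length] at hlb
  have hn := hv.1
  unfold pvBound
  omega

theorem pvHMget_insert {ν : Type} (m : Std.HashMap (List Int) ν) (k k' : List Int) (v : ν) :
    (m.insert k v).get? k' = if k' = k then some v else m.get? k' := by
  rw [Std.HashMap.get?_eq_getElem?, Std.HashMap.getElem?_insert]
  by_cases h : k' = k
  · simp [h]
  · simp [h]
    intro hh
    exact absurd hh.symm h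

theorem pvHMget_empty {ν : Type} (k : List Int) :
    (∅ : Std.HashMap (List Int) ν).get? k = none := by
  simp [Std.HashMap.get?_eq_getElem?]

def pvGoodA (n : Int) (c : Std.HashMap (List Int) Int) : Prop :=
  ∀ t v, c.get? t = some v → pvValid n t ∧ v = pvV n t

def pvGoodB (n : Int) (c : Std.HashMap (List Int) (List Int)) : Prop :=
  ∀ t v, c.get? t = some v → pvValid n t ∧ v = pvVB n t

theorem pvHAM_ok (n : Int) : ∀ (f : Nat) (t : List Int) (c : Std.HashMap (List Int) Int),
    pvValid n t → pvBound n t ≤ f → pvGoodA n c →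
    (pvHAM n f t c).1 = pvV n t ∧ pvGoodA n (pvHAM n f t c).2 := by
  intro f
  induction f with
  | zero => intro t c _ hb _; exact absurd hb (by unfold pvBound; omega)
  | succ f ih =>
    intro t c hv hb hg
    cases hc : Std.HashMap.get? c t with
    | some v =>
      have hgood := hg t v hc
      simp only [pvHAM, hc]
      exact ⟨hgood.2, hg⟩
    | none =>
      simp only [pvHAM, hc]
      have hfold : ∀ (L : List (Int × Int)), (∀ p ∈ L, p ∈ PySem.List.enumerate t 0) →
          ∀ (acc : Int × Std.HashMap (List Int) Int), pvGoodA n acc.2 →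
          (L.foldl (fun (acc : Int × Std.HashMap (List Int) Int) p =>
              if p.2 == 1 then (acc.1 + (if p.1 == 0 then (n ^ (t.sum - n).toNat : Int) else 0), acc.2)
              else
                let rc := pvHAM n f (pvDecA t p.1) acc.2
                (acc.1 + rc.1, rc.2)) acc).1 =
            acc.1 + (L.map (fun p =>
              if p.2 == 1 then (if p.1 == 0 then (n ^ (t.sum - n).toNat : Int) else 0)
              else pvV n (pvDecA t p.1))).sum ∧
          pvGoodA n (L.foldl (fun (acc : Int × Std.HashMap (List Int) Int) p =>
              if p.2 == 1 then (acc.1 + (if p.1 == 0 then (n ^ (t.sum - n).toNat : Int) else 0), acc.2)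
              else
                let rc := pvHAM n f (pvDecA t p.1) acc.2
                (acc.1 + rc.1, rc.2)) acc).2 := by
        intro L
        induction L with
        | nil => intro _ acc hacc; exact ⟨by simp, hacc⟩
        | cons p L' ihL =>
          intro hmem acc hacc
          have hp := hmem p (List.mem_cons_self ..)
          rcases (PySem.List.mem_enumerate_iff t 0 p).mp hp with ⟨jj, hjj, hpe⟩
          have hp1 : p.1 = ((jj : Nat) : Int) := by rw [hpe]; simp
          have hp2 : p.2 = t[jj]! := by rw [hpe]; simp [pvGetBang t jj hjj]
          simp only [List.foldl_cons, List.map_cons, List.sum_cons]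
          by_cases hb1 : (p.2 == 1) = true
          · rw [if_pos hb1, if_pos hb1]
            rcases ihL (fun q hq => hmem q (List.mem_cons_of_mem p hq))
              ((acc.1 + (if p.1 == 0 then (n ^ (t.sum - n).toNat : Int) else 0), acc.2))
              hacc with ⟨e1, e2⟩
            refine ⟨?_, e2⟩
            rw [e1]
            ring
          · rw [if_neg hb1, if_neg hb1]
            have hne : t[jj]! ≠ 1 := by
              rw [← hp2]; simpa using hb1
            have hchild := ih (pvDecA t p.1) acc.2
              (by rw [hp1]; exact pvDec_valid n t jj hv hjj hne)
              (by rw [hp1]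
                  have := pvBound_dec n t jj hv hjj hne
                  omega)
              hacc
            rcases ihL (fun q hq => hmem q (List.mem_cons_of_mem p hq))
              ((acc.1 + (pvHAM n f (pvDecA t p.1) acc.2).1, (pvHAM n f (pvDecA t p.1) acc.2).2))
              hchild.2 with ⟨e1, e2⟩
            refine ⟨by rw [e1, hchild.1]; ring, e2⟩
      rcases hfold (PySem.List.enumerate t 0) (fun p hp => hp) (0, c) hg with ⟨e1, e2⟩
      constructor
      · show (_ : Int × Std.HashMap (List Int) Int).1 = _
        rw [e1, zero_add]
        -- the accumulated sum is the ghost recursion pvV n t unfolded once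
        have hV : pvV n t = ((PySem.List.enumerate t 0).map (fun p =>
            if p.2 == 1 then (if p.1 == 0 then (n ^ (t.sum - n).toNat : Int) else 0)
            else pvHA n ((t.sum - n).toNat) (pvDecA t p.1))).sum := by
          show pvHA n ((t.sum - n).toNat + 1) t = _
          simp only [pvHA]
        rw [hV, pvSumEnumMap0, pvSumEnumMap0]
        refine Finset.sum_congr rfl ?_
        intro j hj
        have hjm : j < t.length := Finset.mem_range.mp hj
        by_cases hb1 : (t[j]! == 1) = true
        · rw [if_pos hb1, if_pos hb1]
        · rw [if_neg hb1, if_neg hb1]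
          have hne : t[j]! ≠ 1 := by simpa using hb1
          have hbd := pvBound_dec n t j hv hjm hne
          show pvV n (pvDecA t (j : Int)) = _
          unfold pvV
          congr 1
          unfold pvBound at hbd ⊢
          omega
      · show pvGoodA n (Std.HashMap.insert _ t _)
        intro t' v' h'
        rw [pvHMget_insert] at h'
        by_cases ht' : t' = t
        · rw [if_pos ht'] at h'
          have hv' : v' = _ := (Option.some_inj.mp h').symm
          subst ht'
          refine ⟨hv, ?_⟩
          rw [hv', e1, zero_add]
          -- same computation as above
          have hV : pvV n t' = ((PySem.List.enumerate t' 0).map (fun p =>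
              if p.2 == 1 then (if p.1 == 0 then (n ^ (t'.sum - n).toNat : Int) else 0)
              else pvHA n ((t'.sum - n).toNat) (pvDecA t' p.1))).sum := by
            show pvHA n ((t'.sum - n).toNat + 1) t' = _
            simp only [pvHA]
          rw [hV, pvSumEnumMap0, pvSumEnumMap0]
          refine (Finset.sum_congr rfl ?_).symm
          intro j hj
          have hjm : j < t'.length := Finset.mem_range.mp hj
          by_cases hb1 : (t'[j]! == 1) = true
          · rw [if_pos hb1, if_pos hb1]
          · rw [if_neg hb1, if_neg hb1]
            have hne : t'[j]! ≠ 1 := by simpa using hb1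
            have hbd := pvBound_dec n t' j hv hjm hne
            show _ = pvV n (pvDecA t' (j : Int))
            unfold pvV
            congr 1
            unfold pvBound at hbd ⊢
            omega
        · rw [if_neg ht'] at h'
          exact e2 t' v' h'

theorem pvSharesM_ok (n : Int) : ∀ (f : Nat) (t : List Int) (c : Std.HashMap (List Int) (List Int)),
    pvValid n t → pvBound n t ≤ f → pvGoodB n c →
    (pvSharesM n f t c).1 = pvVB n t ∧ pvGoodB n (pvSharesM n f t c).2 := by
  intro f
  induction f with
  | zero => intro t c _ hb _; exact absurd hb (by unfold pvBound; omega)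
  | succ f ih =>
    intro t c hv hb hg
    cases hc : Std.HashMap.get? c t with
    | some v =>
      have hgood := hg t v hc
      simp only [pvSharesM, hc]
      exact ⟨hgood.2, hg⟩
    | none =>
      simp only [pvSharesM, hc]
      have hfold : ∀ (L : List (Int × Int)), (∀ p ∈ L, p ∈ PySem.List.enumerate t 0) →
          ∀ (acc : List Int × Std.HashMap (List Int) (List Int)), pvGoodB n acc.2 →
          (L.foldl (fun (acc : List Int × Std.HashMap (List Int) (List Int)) p =>
              if p.2 == 1 then
                ((PySem.List.enumerate acc.1 0).map
                   (fun q => if q.1 == p.1 then q.2 + (n ^ (t.sum - n).toNat : Int) else q.2), acc.2)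
              else
                let rc := pvSharesM n f
                  (PySem.List.slice t none (some p.1) ++ [p.2 - 1] ++
                   PySem.List.slice t (some (p.1 + 1)) none) acc.2
                ((acc.1.zip rc.1).map (fun ab => ab.1 + ab.2), rc.2)) acc).1 =
            L.foldl (pvStep n ((t.sum - n).toNat) t (n ^ (t.sum - n).toNat)) acc.1 ∧
          pvGoodB n (L.foldl (fun (acc : List Int × Std.HashMap (List Int) (List Int)) p =>
              if p.2 == 1 then
                ((PySem.List.enumerate acc.1 0).map
                   (fun q => if q.1 == p.1 then q.2 + (n ^ (t.sum - n).toNat : Int) else q.2), acc.2)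
              else
                let rc := pvSharesM n f
                  (PySem.List.slice t none (some p.1) ++ [p.2 - 1] ++
                   PySem.List.slice t (some (p.1 + 1)) none) acc.2
                ((acc.1.zip rc.1).map (fun ab => ab.1 + ab.2), rc.2)) acc).2 := by
        intro L
        induction L with
        | nil => intro _ acc hacc; exact ⟨rfl, hacc⟩
        | cons p L' ihL =>
          intro hmem acc hacc
          have hp := hmem p (List.mem_cons_self ..)
          rcases (PySem.List.mem_enumerate_iff t 0 p).mp hp with ⟨jj, hjj, hpe⟩
          have hp1 : p.1 = ((jj : Nat) : Int) := by rw [hpe]; simp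
          have hp2 : p.2 = t[jj]! := by rw [hpe]; simp [pvGetBang t jj hjj]
          simp only [List.foldl_cons]
          by_cases hb1 : (p.2 == 1) = true
          · rw [if_pos hb1]
            have hstep : pvStep n ((t.sum - n).toNat) t (n ^ (t.sum - n).toNat) acc.1 p =
                (PySem.List.enumerate acc.1 0).map
                  (fun q => if q.1 == p.1 then q.2 + (n ^ (t.sum - n).toNat : Int) else q.2) := by
              unfold pvStep; rw [if_pos hb1]
            rcases ihL (fun q hq => hmem q (List.mem_cons_of_mem p hq))
              (((PySem.List.enumerate acc.1 0).map
                  (fun q => if q.1 == p.1 then q.2 + (n ^ (t.sum - n).toNat : Int) else q.2), acc.2))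
              hacc with ⟨e1, e2⟩
            exact ⟨by rw [e1, hstep], e2⟩
          · rw [if_neg hb1]
            have hne : t[jj]! ≠ 1 := by
              rw [← hp2]; simpa using hb1
            have hslice : (PySem.List.slice t none (some p.1) ++ [p.2 - 1] ++
                PySem.List.slice t (some (p.1 + 1)) none) = pvDecA t ((jj : Nat) : Int) := by
              rw [hp1, hp2]; exact pvDecS_eq t jj hjj
            have hchild := ih (PySem.List.slice t none (some p.1) ++ [p.2 - 1] ++
                PySem.List.slice t (some (p.1 + 1)) none) acc.2
              (by rw [hslice]; exact pvDec_valid n t jj hv hjj hne)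
              (by rw [hslice]
                  have := pvBound_dec n t jj hv hjj hne
                  omega)
              hacc
            have hbd := pvBound_dec n t jj hv hjj hne
            have hrc1 : (pvSharesM n f (PySem.List.slice t none (some p.1) ++ [p.2 - 1] ++
                PySem.List.slice t (some (p.1 + 1)) none) acc.2).1 =
                pvShares n ((t.sum - n).toNat)
                  (PySem.List.slice t none (some p.1) ++ [p.2 - 1] ++
                   PySem.List.slice t (some (p.1 + 1)) none) := by
              rw [hchild.1, hslice]
              unfold pvVB
              congr 1
              unfold pvBound at hbd ⊢
              omega
            have hstep : pvStep n ((t.sum - n).toNat) t (n ^ (t.sum - n).toNat) acc.1 p =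
                (acc.1.zip (pvSharesM n f (PySem.List.slice t none (some p.1) ++ [p.2 - 1] ++
                   PySem.List.slice t (some (p.1 + 1)) none) acc.2).1).map
                  (fun ab => ab.1 + ab.2) := by
              unfold pvStep; rw [if_neg hb1, hrc1]
            rcases ihL (fun q hq => hmem q (List.mem_cons_of_mem p hq))
              (((acc.1.zip (pvSharesM n f (PySem.List.slice t none (some p.1) ++ [p.2 - 1] ++
                   PySem.List.slice t (some (p.1 + 1)) none) acc.2).1).map (fun ab => ab.1 + ab.2),
                (pvSharesM n f (PySem.List.slice t none (some p.1) ++ [p.2 - 1] ++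
                   PySem.List.slice t (some (p.1 + 1)) none) acc.2).2))
              hchild.2 with ⟨e1, e2⟩
            exact ⟨by rw [e1, hstep], e2⟩
      rcases hfold (PySem.List.enumerate t 0) (fun p hp => hp) (List.replicate t.length 0, c) hg
        with ⟨e1, e2⟩
      have hVB : pvVB n t = (PySem.List.enumerate t 0).foldl
          (pvStep n ((t.sum - n).toNat) t (n ^ (t.sum - n).toNat)) (List.replicate t.length 0) := by
        show pvShares n (pvBound n t) t = _
        rw [show pvBound n t = (t.sum - n).toNat + 1 from rfl, pvShares_succ]
      constructor
      · show (_ : List Int × Std.HashMap (List Int) (List Int)).1 = _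
        rw [e1, hVB]
      · show pvGoodB n (Std.HashMap.insert _ t _)
        intro t' v' h'
        rw [pvHMget_insert] at h'
        by_cases ht' : t' = t
        · rw [if_pos ht'] at h'
          have hv' : v' = _ := (Option.some_inj.mp h').symm
          subst ht'
          exact ⟨hv, by rw [hv', e1, hVB]⟩
        · rw [if_neg ht'] at h'
          exact e2 t' v' h'

-- the list of A's per-player results is B's vector
theorem pvPrelim (fuel : Nat) (score : List Int) :
    (PySem.List.pyRange 0 (score.length : Int) 1).map
        (fun k => pvHA (score.length : Int) fuel (pvSwapA score k)) =
      pvShares (score.length : Int) fuel score := by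
  rw [PySem.List.pyRange_zero_nat, List.map_map]
  apply List.ext_getElem
  · simp [pvShares_length]
  · intro k h1 h2
    have hk : k < score.length := by simpa using h1
    simp only [List.getElem_map, List.getElem_range, Function.comp]
    rw [← pvGetBang _ k h2]
    exact pvMain fuel score k hk

theorem pvSwap_valid (n : Int) (score : List Int) (kn : Nat) (hv : pvValid n score)
    (hk : kn < score.length) : pvValid n (pvSwapA score (kn : Int)) := by
  refine ⟨by rw [pvSwap_length]; exact hv.1, ?_⟩
  intro x hx
  rcases pvMemGet _ x hx with ⟨i, hi, he⟩
  have hi' : i < score.length := by simpa [pvSwap_length] using hi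
  rw [pvSwap_getElemBang score kn i hk hi'] at he
  rw [← he, pvGetBang score _ (pvT_lt hk hi')]
  exact hv.2 _ (List.getElem_mem (pvT_lt hk hi'))

theorem pvSwap_bound (n : Int) (score : List Int) (kn : Nat) (hk : kn < score.length) :
    pvBound n (pvSwapA score (kn : Int)) = pvBound n score := by
  unfold pvBound
  rw [pvSwap_sum score kn hk]

theorem pvAfold (n : Int) (score : List Int) (hv : pvValid n score) :
    ∀ (L : List Int), (∀ k ∈ L, 0 ≤ k ∧ k < (score.length : Int)) →
    ∀ (acc : List Int × Std.HashMap (List Int) Int), pvGoodA n acc.2 →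
    ((L.foldl (fun (acc : List Int × Std.HashMap (List Int) Int) k =>
        (acc.1 ++ [(pvHAM n ((score.sum - n).toNat + 1) (pvSwapA score k) acc.2).1],
         (pvHAM n ((score.sum - n).toNat + 1) (pvSwapA score k) acc.2).2)) acc).1 =
      acc.1 ++ L.map (fun k => pvHA n ((score.sum - n).toNat + 1) (pvSwapA score k))) ∧
    pvGoodA n ((L.foldl (fun (acc : List Int × Std.HashMap (List Int) Int) k =>
        (acc.1 ++ [(pvHAM n ((score.sum - n).toNat + 1) (pvSwapA score k) acc.2).1],
         (pvHAM n ((score.sum - n).toNat + 1) (pvSwapA score k) acc.2).2)) acc).2) := by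
  intro L
  induction L with
  | nil => intro _ acc hacc; exact ⟨by simp, hacc⟩
  | cons k L' ihL =>
    intro hmem acc hacc
    have hk := hmem k (List.mem_cons_self ..)
    have hkn : k = ((k.toNat : Nat) : Int) := by omega
    have hklt : k.toNat < score.length := by omega
    have hvsw : pvValid n (pvSwapA score k) := by
      rw [hkn]; exact pvSwap_valid n score k.toNat hv hklt
    have hbsw : pvBound n (pvSwapA score k) = pvBound n score := by
      rw [hkn]; exact pvSwap_bound n score k.toNat hklt
    have hok := pvHAM_ok n ((score.sum - n).toNat + 1) (pvSwapA score k) acc.2 hvsw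
      (by rw [hbsw]; exact le_of_eq rfl) hacc
    have hval : (pvHAM n ((score.sum - n).toNat + 1) (pvSwapA score k) acc.2).1 =
        pvHA n ((score.sum - n).toNat + 1) (pvSwapA score k) := by
      rw [hok.1]
      unfold pvV
      rw [hbsw]
      rfl
    simp only [List.foldl_cons, List.map_cons]
    rcases ihL (fun q hq => hmem q (List.mem_cons_of_mem k hq))
      ((acc.1 ++ [(pvHAM n ((score.sum - n).toNat + 1) (pvSwapA score k) acc.2).1],
        (pvHAM n ((score.sum - n).toNat + 1) (pvSwapA score k) acc.2).2)) hok.2 with ⟨e1, e2⟩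
    refine ⟨?_, e2⟩
    rw [e1, hval]
    simp

-- ===== VERDICT (by name: the statement is the Claim_ definition above) =====
theorem divide_pot1_spec : Claim_equal_divide_pot1 := by
  intro num_rounds wins _ hpre
  unfold Spec_divide_pot1 divide_pot1 divide_pot1_alt
  dsimp only
  have hvalid : pvValid (((wins.map (fun w => num_rounds - w)).length : Nat) : Int)
      (wins.map (fun w => num_rounds - w)) := by
    refine ⟨rfl, ?_⟩
    intro x hx
    rcases List.mem_map.mp hx with ⟨w, hw, rfl⟩
    have := hpre w hw
    omega
  have hGA : pvGoodA (((wins.map (fun w => num_rounds - w)).length : Nat) : Int)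
      (∅ : Std.HashMap (List Int) Int) := by
    intro t v h
    rw [pvHMget_empty] at h
    cases h
  have hGB : pvGoodB (((wins.map (fun w => num_rounds - w)).length : Nat) : Int)
      (∅ : Std.HashMap (List Int) (List Int)) := by
    intro t v h
    rw [pvHMget_empty] at h
    cases h
  have hA := (pvAfold _ (wins.map (fun w => num_rounds - w)) hvalid
    (PySem.List.pyRange 0 ((wins.map (fun w => num_rounds - w)).length : Int) 1)
    (fun k hk => by
      have := PySem.List.mem_pyRange_one.mp hk
      exact ⟨this.1, this.2⟩)
    ([], ∅) hGA).1
  simp only [List.nil_append] at hA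
  rw [hA, pvPrelim]
  have hB := (pvSharesM_ok (((wins.map (fun w => num_rounds - w)).length : Nat) : Int)
    (((wins.map (fun w => num_rounds - w)).sum -
        ((wins.map (fun w => num_rounds - w)).length : Int)).toNat + 1)
    (wins.map (fun w => num_rounds - w)) ∅ hvalid (le_of_eq rfl) hGB).1
  rw [hB]
  rfl
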